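-- pv_equiv track=rewrite | github.com/Abrish-b/python | oop/more on oop/queen'sGambit.py | queenGambit
-- ===== SOURCE A (Python) =====
-- def queenGambit(num):
--     soln_x = []
--     soln = []
--     if (num % 6) != 2 or (num % 6) != 3:
--         for even in range(1, num+1):
--             if even % 2 == 0:
--                 soln_x.append(even)
--         for odd in range(1, num+1):
--             if odd % 2 != 0:
--                 soln_x.append(odd)
--     elif (num % 6) == 2:
--         for even in range(1, num+1):
--             if even % 2 == 0:
--                 soln_x.append(even)
--         soln_x.append(3)
--         soln_x.append(1)
--         for odd in range(1, num+1):
--             if odd % 2 != 0 and odd != 3 and odd != 1 and odd != 5: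
--                 soln_x.append(odd)
--         soln_x.append(5)
--     elif (num % 6) == 3:
--         for even in range(1, num+1):
--             if even % 2 == 0 and even != 2:
--                 soln_x.append(even)
--         soln_x.append(2)
--         for odd in range(1, num+1):
--             if odd % 2 != 0 and odd != 3 and odd != 1:
--                 soln_x.append(odd)
--         soln_x.append(1)
--         soln_x.append(3)
--     for x, y in zip(soln_x, range(0, num)):
--         soln.append([y, x-1])
--     return soln
-- ===== SOURCE B (Python) =====
-- def queenGambit(num):
--     # A's first branch is always taken (its condition is a tautology), so soln_x is
--     # evens 2..num then odds 1..num; row y gets column soln_x[y]-1, computed directly.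
--     h = num // 2
--     return [[y, 2 * y + 1] if y < h else [y, 2 * (y - h)] for y in range(num)]
-- ===== Notes on version B (the rewrite author's own statement) =====
-- stated objective: simpler
-- what changed: A's branch condition is a tautology (its elif branches are dead), so B drops them and replaces the build-filtered-evens-then-odds-list-then-zip pipeline with a single pass that computes each row's column arithmetically from the index and num//2.
import Mathlib
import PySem

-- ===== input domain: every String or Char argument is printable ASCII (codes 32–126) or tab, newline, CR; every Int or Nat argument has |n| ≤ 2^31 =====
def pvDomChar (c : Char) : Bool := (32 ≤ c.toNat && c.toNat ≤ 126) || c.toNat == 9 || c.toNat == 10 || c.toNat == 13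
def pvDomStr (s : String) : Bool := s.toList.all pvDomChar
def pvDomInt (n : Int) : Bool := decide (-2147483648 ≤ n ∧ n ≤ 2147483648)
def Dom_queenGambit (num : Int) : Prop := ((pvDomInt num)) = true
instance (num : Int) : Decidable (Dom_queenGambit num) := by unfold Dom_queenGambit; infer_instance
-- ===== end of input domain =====

-- B replaces A's dead branches, filtered intermediate list and zip by one direct arithmetic pass; objective: simpler.


-- ===== PORT A =====
def queenGambit (num : Int) : List (List Int) :=
  let soln_x : List Int := []
  let soln : List (List Int) := []
  let soln_x : List Int :=
    if PySem.Int.mod num 6 ≠ 2 ∨ PySem.Int.mod num 6 ≠ 3 then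
      let soln_x := (PySem.List.pyRange 1 (num + 1) 1).foldl
        (fun acc even => if PySem.Int.mod even 2 = 0 then acc ++ [even] else acc) soln_x
      (PySem.List.pyRange 1 (num + 1) 1).foldl
        (fun acc odd => if PySem.Int.mod odd 2 ≠ 0 then acc ++ [odd] else acc) soln_x
    else if PySem.Int.mod num 6 = 2 then
      let soln_x := (PySem.List.pyRange 1 (num + 1) 1).foldl
        (fun acc even => if PySem.Int.mod even 2 = 0 then acc ++ [even] else acc) soln_x
      let soln_x := soln_x ++ [3]
      let soln_x := soln_x ++ [1]
      let soln_x := (PySem.List.pyRange 1 (num + 1) 1).foldl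
        (fun acc odd => if PySem.Int.mod odd 2 ≠ 0 ∧ odd ≠ 3 ∧ odd ≠ 1 ∧ odd ≠ 5 then acc ++ [odd] else acc) soln_x
      soln_x ++ [5]
    else if PySem.Int.mod num 6 = 3 then
      let soln_x := (PySem.List.pyRange 1 (num + 1) 1).foldl
        (fun acc even => if PySem.Int.mod even 2 = 0 ∧ even ≠ 2 then acc ++ [even] else acc) soln_x
      let soln_x := soln_x ++ [2]
      let soln_x := (PySem.List.pyRange 1 (num + 1) 1).foldl
        (fun acc odd => if PySem.Int.mod odd 2 ≠ 0 ∧ odd ≠ 3 ∧ odd ≠ 1 then acc ++ [odd] else acc) soln_x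
      let soln_x := soln_x ++ [1]
      soln_x ++ [3]
    else soln_x
  (soln_x.zip (PySem.List.pyRange 0 num 1)).foldl
    (fun acc p => acc ++ [[p.2, p.1 - 1]]) soln

-- ===== PORT B =====
def queenGambit_alt (num : Int) : List (List Int) :=
  let h := PySem.Int.floordiv num 2
  (PySem.List.pyRange 0 num 1).map
    (fun y => if y < h then [y, 2 * y + 1] else [y, 2 * (y - h)])

-- ===== PRECONDITION & SPEC =====
def Spec_queenGambit (num : Int) (out : List (List Int)) : Prop := out = queenGambit_alt num
instance (num : Int) (out : List (List Int)) : Decidable (Spec_queenGambit num out) := by unfold Spec_queenGambit; infer_instance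

-- ===== CLAIM (what is proved, stated in full; the proofs are below) =====
def Claim_equal_queenGambit : Prop := ∀ (num : Int), Dom_queenGambit num → Spec_queenGambit num (queenGambit num)

-- ===== LEMMAS AND PROOFS =====

-- evens 2,4,…,≤ m drawn from [1..m]
theorem pvEvens (m : Nat) :
    ((List.range m).map (fun (k : Nat) => (1 : Int) + (k : Int))).filter (fun x => decide (PySem.Int.mod x 2 = 0))
      = (List.range (m / 2)).map (fun (j : Nat) => 2 * (j : Int) + 2) := by
  induction m with
  | zero => simp
  | succ m ih =>
    rw [List.range_succ, List.map_append, List.filter_append, ih]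
    have hmod : PySem.Int.mod ((1 : Int) + m) 2 = ((1 + m) : Int) % 2 :=
      PySem.Int.mod_eq_emod_of_pos (by omega)
    rcases Nat.even_or_odd m with he | ho
    · obtain ⟨t, ht⟩ := he
      have h2 : (m + 1) / 2 = m / 2 := by omega
      simp [h2]
      omega
    · obtain ⟨t, ht⟩ := ho
      have h1 : ((1 : Int) + m) % 2 = 0 := by omega
      have h2 : (m + 1) / 2 = m / 2 + 1 := by omega
      have h3 : (1 : Int) + m = 2 * ((m / 2 : Nat) : Int) + 2 := by
        have hh : m / 2 = t := by omega
        rw [hh]; omega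
      rw [h2, List.range_succ, List.map_append]
      simp [h3]

-- odds 1,3,… drawn from [1..m]
theorem pvOdds (m : Nat) :
    ((List.range m).map (fun (k : Nat) => (1 : Int) + (k : Int))).filter (fun x => decide (¬ PySem.Int.mod x 2 = 0))
      = (List.range (m - m / 2)).map (fun (j : Nat) => 2 * (j : Int) + 1) := by
  induction m with
  | zero => simp
  | succ m ih =>
    rw [List.range_succ, List.map_append, List.filter_append, ih]
    have hmod : PySem.Int.mod ((1 : Int) + m) 2 = ((1 + m) : Int) % 2 :=
      PySem.Int.mod_eq_emod_of_pos (by omega)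
    rcases Nat.even_or_odd m with he | ho
    · obtain ⟨t, ht⟩ := he
      have h2 : m + 1 - (m + 1) / 2 = (m - m / 2) + 1 := by omega
      have h3 : (1 : Int) + m = 2 * (((m - m / 2 : Nat)) : Int) + 1 := by
        have hh : m - m / 2 = t := by omega
        rw [hh]; omega
      rw [h2, List.range_succ, List.map_append]
      simp [h3]
    · obtain ⟨t, ht⟩ := ho
      have h2 : m + 1 - (m + 1) / 2 = m - m / 2 := by omega
      simp [h2]
      omega

-- ===== VERDICT (by name: the statement is the Claim_ definition above) =====
theorem queenGambit_spec : Claim_equal_queenGambit := by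
  intro num _
  unfold Spec_queenGambit
  dsimp only [queenGambit, queenGambit_alt]
  have hcond : PySem.Int.mod num 6 ≠ 2 ∨ PySem.Int.mod num 6 ≠ 3 := by
    by_cases h : PySem.Int.mod num 6 = 2
    · right; rw [h]; decide
    · left; exact h
  rw [if_pos hcond]
  rcases (by omega : num ≤ 0 ∨ 0 < num) with hneg | hpos
  · have e0 : PySem.List.pyRange 0 num 1 = [] := PySem.List.pyRange_one_eq_nil hneg
    have e1 : PySem.List.pyRange 1 (num + 1) 1 = [] := PySem.List.pyRange_one_eq_nil (by omega)
    rw [e0, e1, List.zip_nil_right]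
    simp
  · -- num ≥ 1 : work over m = num.toNat
    set m : Nat := num.toNat with hm
    have hnum : num = (m : Int) := by omega
    have hr1 : PySem.List.pyRange 1 (num + 1) 1
        = (List.range m).map (fun (k : Nat) => (1 : Int) + (k : Int)) := by
      rw [PySem.List.pyRange_one]
      have he : (num + 1 - 1).toNat = m := by omega
      rw [he]
    have hr0 : PySem.List.pyRange 0 num 1
        = (List.range m).map (fun (k : Nat) => ((k : Int))) := by
      rw [PySem.List.pyRange_one]
      have : (num - 0).toNat = m := by omega
      rw [this]; simp
    rw [hr1, hr0]
    rw [show (fun acc (even : Int) => if PySem.Int.mod even 2 = 0 then acc ++ [even] else acc)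
        = (fun acc x => if (fun x => decide (PySem.Int.mod x 2 = 0)) x = true then acc ++ [id x] else acc) by
      funext acc x; simp]
    rw [PySem.List.foldl_append_if]
    rw [show (fun acc (odd : Int) => if PySem.Int.mod odd 2 ≠ 0 then acc ++ [odd] else acc)
        = (fun acc x => if (fun x => decide (¬ PySem.Int.mod x 2 = 0)) x = true then acc ++ [id x] else acc) by
      funext acc x; simp]
    rw [PySem.List.foldl_append_if]
    rw [PySem.List.foldl_append_singleton_eq_map]
    simp only [List.map_id, List.nil_append, pvEvens, pvOdds]
    -- fuse the two mapped ranges into one map over range m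
    have hsplit : (List.range (m / 2)).map (fun (j : Nat) => 2 * (j : Int) + 2)
        ++ (List.range (m - m / 2)).map (fun (j : Nat) => 2 * (j : Int) + 1)
        = (List.range m).map (fun (i : Nat) =>
            if i < m / 2 then 2 * (i : Int) + 2 else 2 * ((i : Int) - ((m / 2 : Nat) : Int)) + 1) := by
      have key : ∀ (a b : Nat),
          (List.range a).map (fun (j : Nat) => 2 * (j : Int) + 2)
            ++ (List.range b).map (fun (j : Nat) => 2 * (j : Int) + 1)
          = (List.range (a + b)).map (fun (i : Nat) =>
              if i < a then 2 * (i : Int) + 2 else 2 * ((i : Int) - ((a : Nat) : Int)) + 1) := by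
        intro a b
        rw [List.range_add, List.map_append, List.map_map]
        congr 1
        · apply List.map_congr_left; intro i hi
          simp only [List.mem_range] at hi
          simp [hi]
        · apply List.map_congr_left; intro i _
          have hna : ¬ (a + i < a) := by omega
          simp [hna]
      have := key (m / 2) (m - m / 2)
      rwa [show m / 2 + (m - m / 2) = m from by omega] at this
    rw [hsplit, List.zip_map']
    simp only [List.map_map]
    have hfd : PySem.Int.floordiv num 2 = ((m / 2 : Nat) : Int) := by
      rw [hnum]; exact_mod_cast PySem.Int.floordiv_natCast m 2
    rw [hfd]
    apply List.map_congr_left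
    intro i hi
    simp only [List.mem_range] at hi
    simp only [Function.comp_apply]
    by_cases hlt : i < m / 2
    · have hltI : ((i : Int)) < ((m / 2 : Nat) : Int) := by exact_mod_cast hlt
      rw [if_pos hlt, if_pos hltI]
      norm_num
      ring
    · have hltI : ¬ ((i : Int)) < ((m / 2 : Nat) : Int) := by
        push_cast; omega
      rw [if_neg hlt, if_neg hltI]
      norm_num
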